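-- pv_equiv track=rewrite | github.com/anicol/verityinspect | apps/api/ai_services/analyzer.py | _check_required_safety_equipment
-- ===== SOURCE A (Python) =====
-- def _check_required_safety_equipment(safety_objects):
--     """Check for required safety equipment"""
--     required_equipment = ['fire extinguisher', 'exit sign']
--     missing_count = 0
--
--     for equipment in required_equipment:
--         found = any(equipment in obj.get('name', '').lower() or
--                    equipment in obj.get('class', '').lower()
--                    for obj in safety_objects)
--         if not found:
--             missing_count += 1
--
--     return missing_count
-- ===== SOURCE B (Python) =====
-- def _check_required_safety_equipment(safety_objects):
--     """Check for required safety equipment"""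
--     required_equipment = ['fire extinguisher', 'exit sign']
--     found = set()
--     for obj in safety_objects:
--         name_text = obj.get('name', '').lower()
--         class_text = obj.get('class', '').lower()
--         for equipment in required_equipment:
--             if equipment not in found and (equipment in name_text or equipment in class_text):
--                 found.add(equipment)
--     return len(required_equipment) - len(found)
-- ===== Notes on version B (the rewrite author's own statement) =====
-- stated objective: alternative
-- what changed: Instead of scanning all objects once per required equipment, B makes a single pass over the objects, lowercases each object's name/class once, and accumulates a set of found equipment; the answer is len(required) - len(found).
import Mathlib
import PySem

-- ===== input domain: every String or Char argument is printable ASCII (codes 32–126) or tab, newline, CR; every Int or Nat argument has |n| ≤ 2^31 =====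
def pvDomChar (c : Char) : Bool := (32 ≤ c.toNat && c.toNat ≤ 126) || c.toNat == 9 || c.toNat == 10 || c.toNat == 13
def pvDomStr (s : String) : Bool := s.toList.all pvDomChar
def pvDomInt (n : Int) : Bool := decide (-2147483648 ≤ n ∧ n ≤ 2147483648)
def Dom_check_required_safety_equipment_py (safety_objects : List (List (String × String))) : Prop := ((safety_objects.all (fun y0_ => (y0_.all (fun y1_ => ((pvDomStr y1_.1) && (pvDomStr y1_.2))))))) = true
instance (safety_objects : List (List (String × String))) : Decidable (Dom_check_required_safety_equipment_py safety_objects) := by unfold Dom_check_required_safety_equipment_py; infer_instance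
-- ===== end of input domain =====

-- B replaces A's per-equipment scan over all objects by one pass over the objects
-- that accumulates a set of found equipment (objective: alternative decomposition).

-- ===== PORT A =====
-- A's generator condition: equipment in obj.get('name','').lower() or equipment in obj.get('class','').lower()
def pvHit (equipment : String) (obj : List (String × String)) : Bool :=
  PySem.Str.isIn equipment (PySem.Str.lower ((PySem.Dict.mk obj).getD "name" "")) ||
  PySem.Str.isIn equipment (PySem.Str.lower ((PySem.Dict.mk obj).getD "class" ""))

def check_required_safety_equipment_py (safety_objects : List (List (String × String))) : Int :=
  let required_equipment : List String := ["fire extinguisher", "exit sign"]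
  required_equipment.foldl (fun missing_count equipment =>
    let found := safety_objects.any (fun obj => pvHit equipment obj)
    if !found then missing_count + 1 else missing_count) 0

-- ===== PORT B =====
-- body of B's outer loop: lowercase name/class once, record newly found equipment
def pvStep (found : PySem.Set String) (obj : List (String × String)) : PySem.Set String :=
  let name_text := PySem.Str.lower ((PySem.Dict.mk obj).getD "name" "")
  let class_text := PySem.Str.lower ((PySem.Dict.mk obj).getD "class" "")
  (["fire extinguisher", "exit sign"] : List String).foldl (fun f equipment =>
    if !(PySem.Set.contains f equipment) &&
       (PySem.Str.isIn equipment name_text || PySem.Str.isIn equipment class_text)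
    then PySem.Set.add f equipment else f) found

def check_required_safety_equipment_py_alt (safety_objects : List (List (String × String))) : Int :=
  let required_equipment : List String := ["fire extinguisher", "exit sign"]
  let found := safety_objects.foldl pvStep PySem.Set.empty
  (required_equipment.length : Int) - (found.length : Int)

-- ===== PRECONDITION & SPEC =====
def Spec_check_required_safety_equipment_py (safety_objects : List (List (String × String))) (out : Int) : Prop := out = check_required_safety_equipment_py_alt safety_objects
instance (safety_objects : List (List (String × String))) (out : Int) : Decidable (Spec_check_required_safety_equipment_py safety_objects out) := by unfold Spec_check_required_safety_equipment_py; infer_instance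

-- ===== CLAIM (what is proved, stated in full; the proofs are below) =====
def Claim_equal_check_required_safety_equipment_py : Prop := ∀ (safety_objects : List (List (String × String))), Dom_check_required_safety_equipment_py safety_objects → Spec_check_required_safety_equipment_py safety_objects (check_required_safety_equipment_py safety_objects)

-- ===== LEMMAS AND PROOFS =====

lemma pvStep_spec (f : PySem.Set String) (obj : List (String × String)) :
    ((pvStep f obj).contains "fire extinguisher"
        = (f.contains "fire extinguisher" || pvHit "fire extinguisher" obj))
    ∧ ((pvStep f obj).contains "exit sign"
        = (f.contains "exit sign" || pvHit "exit sign" obj))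
    ∧ ((pvStep f obj).length = f.length
        + (if f.contains "fire extinguisher" = false ∧ pvHit "fire extinguisher" obj = true then 1 else 0)
        + (if f.contains "exit sign" = false ∧ pvHit "exit sign" obj = true then 1 else 0)) := by
  simp only [pvStep, pvHit, List.foldl]
  by_cases h1 : f.contains "fire extinguisher" <;>
  by_cases h2 : f.contains "exit sign" <;>
  by_cases g1 : pvHit "fire extinguisher" obj <;>
  by_cases g2 : pvHit "exit sign" obj <;>
  simp_all [pvHit, PySem.Set.add, PySem.Set.contains]

lemma pvLoop_spec (objs : List (List (String × String))) (f : PySem.Set String) :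
    ((objs.foldl pvStep f).length = f.length
        + (if f.contains "fire extinguisher" = false ∧ objs.any (pvHit "fire extinguisher") = true then 1 else 0)
        + (if f.contains "exit sign" = false ∧ objs.any (pvHit "exit sign") = true then 1 else 0)) := by
  induction objs generalizing f with
  | nil => simp
  | cons o rest ih =>
    have hs := pvStep_spec f o
    simp only [List.foldl_cons, List.any_cons, ih (pvStep f o), hs.1, hs.2.1, hs.2.2]
    by_cases h1 : f.contains "fire extinguisher" <;>
    by_cases h2 : f.contains "exit sign" <;>
    by_cases g1 : pvHit "fire extinguisher" o <;>
    by_cases g2 : pvHit "exit sign" o <;>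
    simp_all <;> omega

-- ===== VERDICT (by name: the statement is the Claim_ definition above) =====
theorem check_required_safety_equipment_py_spec : Claim_equal_check_required_safety_equipment_py := by
  intro objs _
  unfold Spec_check_required_safety_equipment_py
  have hA : check_required_safety_equipment_py objs
      = ((if objs.any (pvHit "fire extinguisher") then (0 : Int) else 1)
        + (if objs.any (pvHit "exit sign") then (0 : Int) else 1)) := by
    unfold check_required_safety_equipment_py
    simp only [List.foldl]
    cases objs.any (pvHit "fire extinguisher") <;>
      cases objs.any (pvHit "exit sign") <;> rfl
  have hB : check_required_safety_equipment_py_alt objs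
      = 2 - ((objs.foldl pvStep ([] : PySem.Set String)).length : Int) := rfl
  rw [hA, hB]
  have h := pvLoop_spec objs ([] : PySem.Set String)
  cases hb1 : objs.any (pvHit "fire extinguisher") <;>
  cases hb2 : objs.any (pvHit "exit sign") <;>
    (simp only [hb1, hb2] at h ;
     norm_num [PySem.Set.empty, PySem.Set.contains] at h ⊢ ;
     first
       | omega
       | (rw [h] ; norm_num))
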